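-- pv_equiv track=rewrite | github.com/wilsone24/Bot-TelegramApi | RRLNHCCC.py | cambiar_valores
-- ===== SOURCE A (Python) =====
-- def cambiar_valores(t, valores, coeficientes_abc, rn): # La funcion resta el valor inicial con el valor de An^2+Bn+C dependiendo del caso
--   if (t==1):
--     for i in range(len(valores)): # Itera sobre los valores
--       valores[i] = valores[i] - ((coeficientes_abc[0]*i) + coeficientes_abc[1]) # f(n) - (An+B)
--   if(t==2):
--     for i in range(len(valores)):
--       valores[i] = valores[i] - (coeficientes_abc[0]*(i**2) + coeficientes_abc[1]*i + coeficientes_abc[2])  # f(n) - (An^2+Bn+c)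
--   if (t==0 and rn==1):
--     for i in range(len(valores)):
--       valores[i]= valores[i] - coeficientes_abc[0]  # f(n) - C
--   if (t==0 and rn>1):
--     for i in range(len(valores)):
--       valores[i]= valores[i] - (coeficientes_abc[0]*(rn**i))  # f(n) - (C*R^n)
--   return valores
-- ===== SOURCE B (Python) =====
-- def cambiar_valores(t, valores, coeficientes_abc, rn):
--     # Incremental generator: the subtracted sequence satisfies the linear
--     # recurrence cur' = cur*m + d, d' = d + dd (finite differences for the
--     # polynomial cases, a geometric multiplier for the C*rn**i case), so no
--     # index arithmetic or powers are needed inside the loop.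
--     if not valores:
--         return valores
--     c = coeficientes_abc
--     if t == 1:
--         cur, d, dd, m = c[1], c[0], 0, 1              # A*i+B: first difference A
--     elif t == 2:
--         cur, d, dd, m = c[2], c[0] + c[1], 2 * c[0], 1  # A*i^2+B*i+C: 2nd diff 2A
--     elif t == 0 and rn == 1:
--         cur, d, dd, m = c[0], 0, 0, 1                 # constant C
--     elif t == 0 and rn > 1:
--         cur, d, dd, m = c[0], 0, 0, rn                # C*rn^i: geometric
--     else:
--         return valores
--     out = []
--     for v in valores:
--         out.append(v - cur)
--         cur = cur * m + d
--         d = d + dd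
--     valores[:] = out                                  # same in-place mutation as A
--     return valores
-- ===== Notes on version B (the rewrite author's own statement) =====
-- stated objective: alternative
-- what changed: Replaces A's four guarded loops that evaluate a closed-form term per index (with i**2 and rn**i powers) by a single incremental recurrence generator (finite differences for the polynomial cases, a geometric multiplier for the C*rn**i case) that rebuilds the list in one pass and assigns it back in place.
import Mathlib
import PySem

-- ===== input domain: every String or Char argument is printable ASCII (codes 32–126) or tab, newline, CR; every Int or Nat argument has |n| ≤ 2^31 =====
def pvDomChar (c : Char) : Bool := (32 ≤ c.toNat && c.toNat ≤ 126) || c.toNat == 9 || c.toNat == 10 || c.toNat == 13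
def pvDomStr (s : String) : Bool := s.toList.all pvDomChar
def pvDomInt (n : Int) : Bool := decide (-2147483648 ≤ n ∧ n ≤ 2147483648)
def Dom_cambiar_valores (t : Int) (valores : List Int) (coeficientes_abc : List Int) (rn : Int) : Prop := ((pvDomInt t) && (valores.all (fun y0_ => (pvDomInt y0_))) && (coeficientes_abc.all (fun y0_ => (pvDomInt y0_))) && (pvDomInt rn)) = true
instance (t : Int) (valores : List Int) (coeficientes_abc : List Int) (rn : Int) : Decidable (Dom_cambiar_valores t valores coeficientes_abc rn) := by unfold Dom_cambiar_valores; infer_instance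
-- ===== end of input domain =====

-- B replaces A's per-index closed-form evaluation (with i**2 and rn**i powers) by an incremental
-- linear-recurrence generator (finite differences / geometric multiplier) in one pass; both mutate
-- the list in place in Python, and the equivalence proved is about the return value.

-- ===== PORT A =====
-- coeficientes_abc[k] is ported as List.getD k 0: exact under Pre_ (enough coefficients for the
-- active branch, or an empty valores so no loop body runs); where Python raises IndexError,
-- Pre_ excludes the input.
def cambiar_valores (t : Int) (valores : List Int) (coeficientes_abc : List Int) (rn : Int) : List Int :=
  let v1 := if t == 1 then
      (PySem.List.pyRange 0 valores.length 1).foldl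
        (fun vs i => vs.set i.toNat (vs.getD i.toNat 0 - (coeficientes_abc.getD 0 0 * i + coeficientes_abc.getD 1 0))) valores
    else valores
  let v2 := if t == 2 then
      (PySem.List.pyRange 0 v1.length 1).foldl
        (fun vs i => vs.set i.toNat (vs.getD i.toNat 0 - (coeficientes_abc.getD 0 0 * i ^ 2 + coeficientes_abc.getD 1 0 * i + coeficientes_abc.getD 2 0))) v1
    else v1
  let v3 := if t == 0 && rn == 1 then
      (PySem.List.pyRange 0 v2.length 1).foldl
        (fun vs i => vs.set i.toNat (vs.getD i.toNat 0 - coeficientes_abc.getD 0 0)) v2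
    else v2
  let v4 := if t == 0 && rn > 1 then
      (PySem.List.pyRange 0 v3.length 1).foldl
        (fun vs i => vs.set i.toNat (vs.getD i.toNat 0 - coeficientes_abc.getD 0 0 * rn ^ i.toNat)) v3
    else v3
  v4

-- ===== PORT B =====
-- Source B's `for v in valores: out.append(v - cur); cur = cur*m + d; d = d + dd` as a structural
-- recursion carrying the recurrence state (cur, d); dd and m are constant through the loop.
def cambiarLoopB (vs : List Int) (cur d dd m : Int) : List Int :=
  match vs with
  | [] => []
  | v :: rest => (v - cur) :: cambiarLoopB rest (cur * m + d) (d + dd) dd m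

def cambiar_valores_alt (t : Int) (valores : List Int) (coeficientes_abc : List Int) (rn : Int) : List Int :=
  if valores.isEmpty then valores
  else
    let c := coeficientes_abc
    if t == 1 then cambiarLoopB valores (c.getD 1 0) (c.getD 0 0) 0 1
    else if t == 2 then cambiarLoopB valores (c.getD 2 0) (c.getD 0 0 + c.getD 1 0) (2 * c.getD 0 0) 1
    else if t == 0 && rn == 1 then cambiarLoopB valores (c.getD 0 0) 0 0 1
    else if t == 0 && rn > 1 then cambiarLoopB valores (c.getD 0 0) 0 0 rn
    else valores

-- ===== PRECONDITION & SPEC =====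
-- Pre_ excludes exactly the inputs where Python A raises IndexError (coeficientes_abc shorter than
-- the active branch reads, with a nonempty valores); B raises there too.
def Pre_cambiar_valores (t : Int) (valores : List Int) (coeficientes_abc : List Int) (rn : Int) : Prop :=
  valores = [] ∨
    ((t = 1 → 2 ≤ coeficientes_abc.length) ∧
     (t = 2 → 3 ≤ coeficientes_abc.length) ∧
     (t = 0 ∧ 1 ≤ rn → 1 ≤ coeficientes_abc.length))
instance (t : Int) (valores : List Int) (coeficientes_abc : List Int) (rn : Int) : Decidable (Pre_cambiar_valores t valores coeficientes_abc rn) := by unfold Pre_cambiar_valores; infer_instance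
def pvWitness_cambiar_valores : Int × List Int × List Int × Int := (1, [5, 7, 9], [2, 3], 0)
def Spec_cambiar_valores (t : Int) (valores : List Int) (coeficientes_abc : List Int) (rn : Int) (out : List Int) : Prop := out = cambiar_valores_alt t valores coeficientes_abc rn
instance (t : Int) (valores : List Int) (coeficientes_abc : List Int) (rn : Int) (out : List Int) : Decidable (Spec_cambiar_valores t valores coeficientes_abc rn out) := by unfold Spec_cambiar_valores; infer_instance

-- ===== CLAIM (what is proved, stated in full; the proofs are below) =====
def Claim_equal_cambiar_valores : Prop := ∀ (t : Int) (valores : List Int) (coeficientes_abc : List Int) (rn : Int), Dom_cambiar_valores t valores coeficientes_abc rn → Pre_cambiar_valores t valores coeficientes_abc rn → Spec_cambiar_valores t valores coeficientes_abc rn (cambiar_valores t valores coeficientes_abc rn)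

-- ===== LEMMAS AND PROOFS =====

-- A's in-place index loop, folded over range(len(vs)), equals a mapIdx with the same per-index term.
theorem loop_set_eq_mapIdx_aux (g : Int → Int) :
    ∀ (rest done : List Int),
      (PySem.List.pyRange (done.length : Int) ((done.length : Int) + rest.length) 1).foldl
          (fun vs i => vs.set i.toNat (vs.getD i.toNat 0 - g i)) (done ++ rest)
        = done ++ rest.mapIdx (fun j v => v - g ((done.length + j : Nat) : Int)) := by
  intro rest
  induction rest with
  | nil =>
      intro done
      simp
  | cons r rs ih =>
      intro done
      have hlt : (done.length : Int) < (done.length : Int) + (r :: rs).length := by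
        simp
      rw [PySem.List.pyRange_one_cons hlt]
      have hset : (done ++ r :: rs).set done.length
            ((done ++ r :: rs).getD done.length 0 - g done.length)
          = (done ++ [r - g done.length]) ++ rs := by
        have hg : (done ++ r :: rs).getD done.length 0 = r := by
          simp [List.getD]
        rw [hg]
        rw [List.set_append_right _ _ (le_refl _)]
        simp
      simp only [List.foldl_cons, Int.toNat_natCast, hset]
      have hlen : ((done ++ [r - g (done.length : Int)]).length : Int) = (done.length : Int) + 1 := by
        simp
      have h2 := ih (done ++ [r - g (done.length : Int)])
      rw [hlen] at h2
      have harg : (done.length : Int) + 1 + (rs.length : Int)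
          = (done.length : Int) + ((r :: rs).length : Int) := by simp; ring
      rw [harg] at h2
      rw [h2]
      simp only [List.mapIdx_cons, List.append_assoc, List.cons_append, List.nil_append,
        List.length_append, List.length_cons, List.length_nil]
      congr 1
      refine List.cons_eq_cons.mpr ⟨by norm_num, ?_⟩
      congr 1
      funext j v
      congr 2
      push_cast
      ring

theorem loop_set_eq_mapIdx (g : Int → Int) (vs : List Int) :
    (PySem.List.pyRange 0 (vs.length : Int) 1).foldl
        (fun ws i => ws.set i.toNat (ws.getD i.toNat 0 - g i)) vs
      = vs.mapIdx (fun j v => v - g (j : Int)) := by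
  have h := loop_set_eq_mapIdx_aux g vs []
  simpa using h

-- B's recurrence loop equals a mapIdx with the closed-form term F, provided the state (cur, d)
-- follows F's first/second differences: F(k+1) = F(k)*m + D(k), D(k+1) = D(k) + dd.
theorem cambiarLoopB_eq_mapIdx (F D : Nat → Int) (dd m : Int)
    (hF : ∀ k, F (k + 1) = F k * m + D k) (hD : ∀ k, D (k + 1) = D k + dd) :
    ∀ (vs : List Int) (k : Nat),
      cambiarLoopB vs (F k) (D k) dd m = vs.mapIdx (fun j v => v - F (k + j)) := by
  intro vs
  induction vs with
  | nil => intro k; simp [cambiarLoopB]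
  | cons v rest ih =>
      intro k
      have h1 : F k * m + D k = F (k + 1) := (hF k).symm
      have h2 : D k + dd = D (k + 1) := (hD k).symm
      simp only [cambiarLoopB, h1, h2, ih (k + 1), List.mapIdx_cons]
      refine congrArg₂ List.cons (by simp) ?_
      congr 1
      funext j v'
      congr 2
      omega

-- Wrapper keyed on the initial state (cur, d) instead of F 0 / D 0, for direct rewriting.
theorem cambiarLoopB_closed (F D : Nat → Int) (cur d dd m : Int)
    (hc : cur = F 0) (hd : d = D 0)
    (hF : ∀ k, F (k + 1) = F k * m + D k) (hD : ∀ k, D (k + 1) = D k + dd)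
    (vs : List Int) :
    cambiarLoopB vs cur d dd m = vs.mapIdx (fun j v => v - F j) := by
  subst hc hd
  simpa using cambiarLoopB_eq_mapIdx F D dd m hF hD vs 0

-- ===== VERDICT (by name: the statement is the Claim_ definition above) =====
theorem cambiar_valores_spec : Claim_equal_cambiar_valores := by
  intro t valores coef rn _ _
  unfold Spec_cambiar_valores cambiar_valores cambiar_valores_alt
  by_cases hemp : valores = []
  · subst hemp
    simp [PySem.List.pyRange]
  · have hne : valores.isEmpty = false := by simp [hemp]
    simp only [hne, Bool.false_eq_true, if_false]
    by_cases h1 : t = 1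
    · have e1 : (t == 1) = true := by simp [h1]
      have e2 : (t == 2) = false := by simp [h1]
      have e0 : (t == 0) = false := by simp [h1]
      simp only [e1, e2, e0, Bool.false_and, if_true, if_false, Bool.false_eq_true]
      rw [loop_set_eq_mapIdx]
      rw [cambiarLoopB_closed (fun k : Nat => coef.getD 0 0 * (k : Int) + coef.getD 1 0)
            (fun _ => coef.getD 0 0) _ _ _ _
            (by push_cast; ring) rfl
            (by intro k; push_cast; ring) (by intro k; ring) valores]
    · by_cases h2 : t = 2
      · have e1 : (t == 1) = false := by simp [h2]
        have e2 : (t == 2) = true := by simp [h2]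
        have e0 : (t == 0) = false := by simp [h2]
        simp only [e1, e2, e0, Bool.false_and, if_true, if_false, Bool.false_eq_true]
        rw [loop_set_eq_mapIdx]
        rw [cambiarLoopB_closed
              (fun k : Nat => coef.getD 0 0 * (k : Int) ^ 2 + coef.getD 1 0 * (k : Int) + coef.getD 2 0)
              (fun k : Nat => coef.getD 0 0 * (2 * (k : Int) + 1) + coef.getD 1 0) _ _ _ _
              (by push_cast; ring) (by push_cast; ring)
              (by intro k; push_cast; ring) (by intro k; push_cast; ring) valores]
      · by_cases h0 : t = 0
        · have e1 : (t == 1) = false := by simp [h0]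
          have e2 : (t == 2) = false := by simp [h0]
          have e0 : (t == 0) = true := by simp [h0]
          by_cases hr1 : rn = 1
          · have er : (rn == 1) = true := by simp [hr1]
            have erg : decide (rn > 1) = false := by simp [hr1]
            simp only [e1, e2, e0, er, erg, Bool.and_false, if_true, if_false,
              Bool.and_true, Bool.false_eq_true]
            rw [loop_set_eq_mapIdx]
            rw [cambiarLoopB_closed (fun _ => coef.getD 0 0) (fun _ => 0) _ _ _ _
                  rfl rfl (by intro k; ring) (by intro k; ring) valores]
          · by_cases hrg : rn > 1
            · have er : (rn == 1) = false := by simp [hr1]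
              have erg : decide (rn > 1) = true := by simp [hrg]
              simp only [e1, e2, e0, er, erg, Bool.true_and, Bool.and_false, if_true, if_false,
                Bool.false_eq_true]
              rw [loop_set_eq_mapIdx]
              rw [cambiarLoopB_closed (fun k : Nat => coef.getD 0 0 * rn ^ k) (fun _ => 0) _ _ _ _
                    (by norm_num) rfl
                    (by intro k; simp only [pow_succ]; ring) (by intro k; ring) valores]
              simp
            · have er : (rn == 1) = false := by simp [hr1]
              have erg : decide (rn > 1) = false := by simp; omega
              simp only [e1, e2, e0, er, erg, Bool.and_false, if_false,
                Bool.false_eq_true]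
        · have e1 : (t == 1) = false := by simp [h1]
          have e2 : (t == 2) = false := by simp [h2]
          have e0 : (t == 0) = false := by simp [h0]
          simp only [e1, e2, e0, Bool.false_and, if_false, Bool.false_eq_true]
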